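-- pv_equiv track=rewrite | github.com/namuan/kube-rider | kuberider/core/terminal.py | win32_escape
-- ===== SOURCE A (Python) =====
-- def win32_escape(argument, force=False):
--     if force is False and argument:
--         clear = True
--         for n in ' \n\r\t\v\"':
--             if n in argument:
--                 clear = False
--                 break
--         if clear:
--             return argument
--     output = '"'
--     size = len(argument)
--     i = 0
--     while True:
--         blackslashes = 0
--         while (i < size and argument[i] == '\\'):
--             i += 1
--             blackslashes += 1
--         if i == size:
--             output += '\\' * (blackslashes * 2)
--             break
--         if argument[i] == '"':
--             output += '\\' * (blackslashes * 2 + 1)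
--             output += '"'
--         else:
--             output += '\\' * blackslashes
--             output += argument[i]
--         i += 1
--     output += '"'
--     return output
-- ===== SOURCE B (Python) =====
-- def win32_escape(argument, force=False):
--     if force is False and argument:
--         if not any(c in argument for c in ' \n\r\t\v"'):
--             return argument
--     escaped = []
--     for part in argument.split('"'):
--         t = 0
--         for ch in reversed(part):
--             if ch == '\\':
--                 t += 1
--             else:
--                 break
--         escaped.append(part + '\\' * t)
--     return '"' + '\\"'.join(escaped) + '"'
-- ===== Notes on version B (the rewrite author's own statement) =====
-- stated objective: idiomatic
-- what changed: Replaced the hand-written index/while scanner that counts backslash runs with a split-on-quote / double-trailing-backslashes-per-part / join-with-backslash-quote pipeline.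
import Mathlib
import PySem

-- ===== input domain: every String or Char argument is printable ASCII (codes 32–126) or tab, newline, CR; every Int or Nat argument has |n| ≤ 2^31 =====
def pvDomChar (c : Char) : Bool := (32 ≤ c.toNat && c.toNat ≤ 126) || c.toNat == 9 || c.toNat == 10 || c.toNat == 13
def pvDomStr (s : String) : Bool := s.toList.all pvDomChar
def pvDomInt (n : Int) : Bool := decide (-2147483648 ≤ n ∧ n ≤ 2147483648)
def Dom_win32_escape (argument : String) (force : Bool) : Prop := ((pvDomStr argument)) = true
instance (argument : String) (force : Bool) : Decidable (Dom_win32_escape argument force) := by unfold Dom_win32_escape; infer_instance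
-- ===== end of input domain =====

-- B replaces A's hand-written while-loop scanner by split-on-quote / double trailing
-- backslashes of each part / join with backslash-quote (idiomatic, same cost).

-- ===== PORT A =====

-- the inner `while i < size and argument[i] == '\\'` loop: count of leading backslashes
-- and the rest of the string from position i
def pvCountBS : List Char → Nat × List Char
  | [] => (0, [])
  | c :: rest =>
    if c = '\\' then ((pvCountBS rest).1 + 1, (pvCountBS rest).2)
    else (0, c :: rest)

-- termination fact the port's outer loop cites
theorem pvCountBS_length (cs : List Char) : (pvCountBS cs).2.length ≤ cs.length := by
  induction cs with
  | nil => simp [pvCountBS]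
  | cons c rest ih =>
    by_cases h : c = '\\' <;> simp [pvCountBS, h] <;> omega

-- A's outer `while True` loop, building the output between the surrounding quotes
def pvLoopA (cs : List Char) : List Char :=
  match h : pvCountBS cs with
  | (b, []) => List.replicate (b * 2) '\\'
  | (b, '"' :: rest) => List.replicate (b * 2 + 1) '\\' ++ '"' :: pvLoopA rest
  | (b, c :: rest) => List.replicate b '\\' ++ c :: pvLoopA rest
termination_by cs.length
decreasing_by
  all_goals
    have h2 := pvCountBS_length cs
    rw [h] at h2
    simp at h2
    omega

-- the `for n in ' \n\r\t\v"': if n in argument: clear = False; break` loop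
def pvClearLoop : List Char → List Char → Bool
  | [], _ => true
  | n :: ns, arg => if PySem.Chars.isIn [n] arg then false else pvClearLoop ns arg

def win32_escape (argument : String) (force : Bool) : String :=
  let cs := argument.toList
  if (force == false && !cs.isEmpty) && pvClearLoop [' ', '\n', '\r', '\t', '\x0B', '"'] cs then
    argument
  else
    String.mk ('"' :: pvLoopA cs ++ ['"'])

-- ===== PORT B =====

-- the `for ch in reversed(part)` counting loop = count of leading backslashes of the reverse
def pvLeadBS : List Char → Nat
  | [] => 0
  | c :: rest => if c = '\\' then pvLeadBS rest + 1 else 0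

-- one loop body of B: part + '\\' * t
def pvDbl (p : List Char) : List Char := p ++ List.replicate (pvLeadBS p.reverse) '\\'

def win32_escape_alt (argument : String) (force : Bool) : String :=
  let cs := argument.toList
  if (force == false && !cs.isEmpty)
      && ([' ', '\n', '\r', '\t', '\x0B', '"'].all fun c => !PySem.Chars.isIn [c] cs) then
    argument
  else
    String.mk ('"' :: PySem.Chars.join ['\\', '"'] ((PySem.Chars.splitOn cs ['"']).map pvDbl) ++ ['"'])

-- ===== PRECONDITION & SPEC =====
def Spec_win32_escape (argument : String) (force : Bool) (out : String) : Prop := out = win32_escape_alt argument force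
instance (argument : String) (force : Bool) (out : String) : Decidable (Spec_win32_escape argument force out) := by unfold Spec_win32_escape; infer_instance

-- ===== CLAIM (what is proved, stated in full; the proofs are below) =====
def Claim_equal_win32_escape : Prop := ∀ (argument : String) (force : Bool), Dom_win32_escape argument force → Spec_win32_escape argument force (win32_escape argument force)

-- ===== LEMMAS AND PROOFS =====

-- the natural structural recursion computing Python's s.split('"')
def pvMySplit : List Char → List (List Char)
  | [] => [[]]
  | c :: cs =>
    if c = '"' then [] :: pvMySplit cs
    else
      match pvMySplit cs with
      | [] => [[c]]
      | h :: t => (c :: h) :: t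

theorem pvMySplit_ne_nil (cs : List Char) : pvMySplit cs ≠ [] := by
  cases cs with
  | nil => simp [pvMySplit]
  | cons c cs =>
    by_cases h : c = '"'
    · simp [pvMySplit, h]
    · simp only [pvMySplit, h, if_neg]
      cases pvMySplit cs <;> simp

def pvPrepend (x : List Char) : List (List Char) → List (List Char)
  | [] => [x]
  | h :: t => (x ++ h) :: t

theorem splitOn_go_eq (fuel : Nat) : ∀ (l cur : List Char) (acc : List (List Char)),
    l.length < fuel →
    PySem.Chars.splitOn.go ['"'] fuel l cur acc = acc.reverse ++ pvPrepend cur.reverse (pvMySplit l) := by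
  induction fuel with
  | zero => intro l cur acc h; omega
  | succ f ih =>
    intro l cur acc h
    cases l with
    | nil => simp [PySem.Chars.splitOn.go, pvMySplit, pvPrepend]
    | cons c rest =>
      by_cases hc : c = '"'
      · subst hc
        rw [PySem.Chars.splitOn.go]
        simp only [List.isPrefixOf, BEq.rfl, Bool.true_and, if_pos]
        rw [show List.drop ['"'].length ('"' :: rest) = rest from rfl]
        rw [ih rest [] _ (by simpa using Nat.lt_of_succ_lt_succ h)]
        simp only [pvMySplit, if_pos rfl]
        have := pvMySplit_ne_nil rest
        cases hs : pvMySplit rest with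
        | nil => exact absurd hs this
        | cons h t => simp [pvPrepend]
      · rw [PySem.Chars.splitOn.go]
        have hpre : List.isPrefixOf ['"'] (c :: rest) = false := by
          simp [List.isPrefixOf, hc, Ne.symm hc]
        simp only [hpre, Bool.false_eq_true, if_neg, not_false_iff]
        rw [ih rest (c :: cur) acc (by simpa using Nat.lt_of_succ_lt_succ h)]
        simp only [pvMySplit, hc, if_neg, not_false_iff]
        cases hs : pvMySplit rest with
        | nil => exact absurd hs (pvMySplit_ne_nil rest)
        | cons h t => simp [pvPrepend]

theorem splitOn_eq_mySplit (cs : List Char) :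
    PySem.Chars.splitOn cs ['"'] = pvMySplit cs := by
  unfold PySem.Chars.splitOn
  rw [splitOn_go_eq (cs.length + 1) cs [] [] (by omega)]
  cases hs : pvMySplit cs with
  | nil => exact absurd hs (pvMySplit_ne_nil cs)
  | cons h t => simp [pvPrepend]

-- leading-backslash count of an append
theorem pvLeadBS_append (xs ys : List Char) :
    pvLeadBS (xs ++ ys) =
      if xs.all (· == '\\') then xs.length + pvLeadBS ys else pvLeadBS xs := by
  induction xs with
  | nil => simp [pvLeadBS]
  | cons c rest ih =>
    by_cases h : c = '\\'
    · subst h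
      simp only [List.cons_append, pvLeadBS, if_pos rfl, ih, List.all_cons, BEq.rfl, Bool.true_and]
      split_ifs <;> simp [pvLeadBS] <;> omega
    · have hcb : (c == '\\') = false := by simpa using h
      simp only [List.cons_append, pvLeadBS, if_neg h, List.all_cons, hcb, Bool.false_and,
        Bool.false_eq_true, if_neg, not_false_iff]

theorem pvLeadBS_all (xs : List Char) (h : xs.all (· == '\\') = true) :
    pvLeadBS xs = xs.length := by
  have := pvLeadBS_append xs []
  simpa [h, pvLeadBS] using this

theorem pvDbl_cons (c : Char) (p : List Char) (h : c ≠ '\\') :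
    pvDbl (c :: p) = c :: pvDbl p := by
  unfold pvDbl
  simp only [List.reverse_cons, pvLeadBS_append]
  by_cases hall : p.reverse.all (· == '\\') = true
  · simp [hall, pvLeadBS, h, pvLeadBS_all _ hall]
  · simp [hall]

theorem pvRepAll (n : Nat) : (List.replicate n '\\').all (· == '\\') = true := by simp

theorem pvDbl_rep (n : Nat) : pvDbl (List.replicate n '\\') = List.replicate (2 * n) '\\' := by
  unfold pvDbl
  rw [List.reverse_replicate, pvLeadBS_all _ (pvRepAll n), List.length_replicate,
    List.replicate_append_replicate]
  congr 1
  omega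

theorem pvDbl_cons_bs (p : List Char) :
    pvDbl ('\\' :: p) = (if p.all (· == '\\') then ['\\', '\\'] else ['\\']) ++ pvDbl p := by
  by_cases hall : p.all (· == '\\') = true
  · have hp : p = List.replicate p.length '\\' := by
      rw [List.eq_replicate_iff]
      refine ⟨rfl, fun b hb => ?_⟩
      simpa using List.all_eq_true.mp hall b hb
    have hcons : ('\\' :: p : List Char) = List.replicate (p.length + 1) '\\' := by
      rw [List.replicate_succ, ← hp]
    rw [if_pos hall, hcons]
    conv_rhs => rw [hp]
    rw [pvDbl_rep, pvDbl_rep,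
      show (['\\', '\\'] : List Char) = List.replicate 2 '\\' from rfl,
      List.replicate_append_replicate]
    congr 1
    omega
  · have hall' : p.reverse.all (· == '\\') = false := by
      simpa using (by simpa using hall : ¬ (p.all (· == '\\') = true))
    rw [if_neg (by simp [hall])]
    unfold pvDbl
    simp [List.reverse_cons, pvLeadBS_append, hall']

-- the 'is the rest of the string (after leading backslashes) a quote or the end' test
def pvDanger (cs : List Char) : Bool :=
  match (pvCountBS cs).2 with
  | [] => true
  | c :: _ => c == '"'

theorem pvCountBS_bs (cs : List Char) :
    pvCountBS ('\\' :: cs) = ((pvCountBS cs).1 + 1, (pvCountBS cs).2) := by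
  simp [pvCountBS]

theorem pvCountBS_other (c : Char) (cs : List Char) (h : c ≠ '\\') :
    pvCountBS (c :: cs) = (0, c :: cs) := by
  simp [pvCountBS, h]

theorem pvDanger_eq (cs : List Char) (h : List Char) (t : List (List Char))
    (hs : pvMySplit cs = h :: t) : pvDanger cs = h.all (· == '\\') := by
  induction cs generalizing h t with
  | nil =>
    simp [pvMySplit] at hs
    simp [pvDanger, pvCountBS, hs.1]
  | cons c cs ih =>
    by_cases hc : c = '"'
    · subst hc
      simp [pvMySplit] at hs
      simp [pvDanger, pvCountBS_other '"' cs (by decide), hs.1]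
    · rw [pvMySplit, if_neg hc] at hs
      cases hs' : pvMySplit cs with
      | nil => exact absurd hs' (pvMySplit_ne_nil cs)
      | cons h' t' =>
        rw [hs'] at hs
        have hs2 : (c :: h') :: t' = h :: t := hs
        have hh : h = c :: h' := by injection hs2 with e1 _; exact e1.symm
        subst hh
        by_cases hb : c = '\\'
        · subst hb
          have hd : pvDanger ('\\' :: cs) = pvDanger cs := by
            simp [pvDanger, pvCountBS_bs]
          rw [hd, ih h' t' hs']
          simp
        · have hcb : (c == '\\') = false := by simpa using hb
          simp [pvDanger, pvCountBS_other c cs hb, hcb,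
            (by simpa using hc : (c == '"') = false)]

-- unfolding pvLoopA, phrased through the components of pvCountBS
theorem pvLoopA_of_nil (cs : List Char) (h : (pvCountBS cs).2 = []) :
    pvLoopA cs = List.replicate ((pvCountBS cs).1 * 2) '\\' := by
  rw [pvLoopA]
  split <;> rename_i heq
  · simp [heq]
  · rw [heq] at h; simp at h
  · rw [heq] at h; simp at h

theorem pvLoopA_of_quote (cs rest : List Char) (h : (pvCountBS cs).2 = '"' :: rest) :
    pvLoopA cs = List.replicate ((pvCountBS cs).1 * 2 + 1) '\\' ++ '"' :: pvLoopA rest := by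
  rw [pvLoopA]
  split <;> rename_i heq
  · rw [heq] at h; simp at h
  · rw [heq] at h
    simp at h
    subst h
    simp [heq]
  · rw [heq] at h
    simp at h
    simp_all

theorem pvLoopA_of_char (cs : List Char) (c : Char) (rest : List Char)
    (h : (pvCountBS cs).2 = c :: rest) (hc : c ≠ '"') :
    pvLoopA cs = List.replicate (pvCountBS cs).1 '\\' ++ c :: pvLoopA rest := by
  rw [pvLoopA]
  split <;> rename_i heq
  · rw [heq] at h; simp at h
  · rw [heq] at h
    simp at h
    exact absurd h.1 (Ne.symm hc)
  · rw [heq] at h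
    simp at h
    obtain ⟨rfl, rfl⟩ := h
    simp [heq]

-- one-step recurrences for A's loop
theorem pvLoopA_nil : pvLoopA [] = [] := by
  rw [pvLoopA_of_nil [] (by simp [pvCountBS])]
  simp [pvCountBS]

theorem pvLoopA_quote (cs : List Char) : pvLoopA ('"' :: cs) = '\\' :: '"' :: pvLoopA cs := by
  have h := pvCountBS_other '"' cs (by decide)
  rw [pvLoopA_of_quote ('"' :: cs) cs (by rw [h]), h]
  rfl

theorem pvLoopA_other (c : Char) (cs : List Char) (h1 : c ≠ '"') (h2 : c ≠ '\\') :
    pvLoopA (c :: cs) = c :: pvLoopA cs := by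
  have h := pvCountBS_other c cs h2
  rw [pvLoopA_of_char (c :: cs) c cs (by rw [h]) h1, h]
  rfl

theorem pvLoopA_bs (cs : List Char) :
    pvLoopA ('\\' :: cs) = (if pvDanger cs then ['\\', '\\'] else ['\\']) ++ pvLoopA cs := by
  have hb := pvCountBS_bs cs
  cases hr : (pvCountBS cs).2 with
  | nil =>
    rw [pvLoopA_of_nil ('\\' :: cs) (by rw [hb]; exact hr), pvLoopA_of_nil cs hr, hb]
    simp only [pvDanger, hr, if_pos]
    rw [show ((pvCountBS cs).1 + 1) * 2 = 2 + (pvCountBS cs).1 * 2 by ring,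
      ← List.replicate_append_replicate]
    rfl
  | cons c rest =>
    by_cases hc : c = '"'
    · subst hc
      rw [pvLoopA_of_quote ('\\' :: cs) rest (by rw [hb]; exact hr),
        pvLoopA_of_quote cs rest hr, hb]
      simp only [pvDanger, hr, BEq.rfl, if_pos]
      rw [show ((pvCountBS cs).1 + 1) * 2 + 1 = 2 + ((pvCountBS cs).1 * 2 + 1) by ring,
        ← List.replicate_append_replicate]
      simp
    · rw [pvLoopA_of_char ('\\' :: cs) c rest (by rw [hb]; exact hr) hc,
        pvLoopA_of_char cs c rest hr hc, hb]
      have : pvDanger cs = false := by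
        simp [pvDanger, hr, hc]
      rw [this]
      simp only [Bool.false_eq_true, if_neg, not_false_iff]
      rw [show (pvCountBS cs).1 + 1 = 1 + (pvCountBS cs).1 by ring,
        ← List.replicate_append_replicate]
      rfl

theorem join_prepend (sep x a : List Char) (l : List (List Char)) :
    PySem.Chars.join sep ((x ++ a) :: l) = x ++ PySem.Chars.join sep (a :: l) := by
  cases l with
  | nil => rw [PySem.Chars.join_singleton, PySem.Chars.join_singleton]
  | cons b r => rw [PySem.Chars.join_cons_cons, PySem.Chars.join_cons_cons]; simp

-- the heart: A's scanner equals B's split/escape/join pipeline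
theorem pvLoopA_eq (cs : List Char) :
    pvLoopA cs = PySem.Chars.join ['\\', '"'] ((pvMySplit cs).map pvDbl) := by
  induction cs with
  | nil =>
    rw [pvLoopA_nil]
    simp [pvMySplit, pvDbl, pvLeadBS, PySem.Chars.join_singleton]
  | cons c cs ih =>
    by_cases hq : c = '"'
    · subst hq
      rw [pvLoopA_quote, ih, show pvMySplit ('"' :: cs) = [] :: pvMySplit cs by simp [pvMySplit]]
      cases hs : pvMySplit cs with
      | nil => exact absurd hs (pvMySplit_ne_nil cs)
      | cons h t =>
        simp only [List.map_cons, PySem.Chars.join_cons_cons]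
        simp [pvDbl, pvLeadBS]
    · cases hs : pvMySplit cs with
      | nil => exact absurd hs (pvMySplit_ne_nil cs)
      | cons h t =>
        have hsplit : pvMySplit (c :: cs) = (c :: h) :: t := by
          rw [pvMySplit, if_neg hq, hs]
        by_cases hb : c = '\\'
        · subst hb
          rw [pvLoopA_bs, ih, pvDanger_eq cs h t hs, hs, hsplit]
          simp only [List.map_cons]
          rw [pvDbl_cons_bs, join_prepend]
        · rw [pvLoopA_other c cs hq hb, ih, hs, hsplit]
          simp only [List.map_cons]
          rw [pvDbl_cons c h hb, show (c :: pvDbl h) = [c] ++ pvDbl h from rfl, join_prepend]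
          rfl

-- the guard loops agree
theorem pvClearLoop_eq (ns arg : List Char) :
    pvClearLoop ns arg = ns.all (fun c => !PySem.Chars.isIn [c] arg) := by
  induction ns with
  | nil => simp [pvClearLoop]
  | cons n ns ih =>
    by_cases h : PySem.Chars.isIn [n] arg = true <;> simp [pvClearLoop, h, ih]

-- ===== VERDICT (by name: the statement is the Claim_ definition above) =====
theorem win32_escape_spec : Claim_equal_win32_escape := by
  intro argument force _
  unfold Spec_win32_escape win32_escape win32_escape_alt
  simp only [pvClearLoop_eq, pvLoopA_eq, splitOn_eq_mySplit]
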